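-- pv_equiv track=rewrite | github.com/alexvasilikop/Genome_assembly_statistics | assembly_basic_stats.py | number_of_gaps
-- ===== SOURCE A (Python) =====
-- def number_of_gaps(list_of_strings):
-- 	'''
-- 	Any string of Ns >=1 is considered as a gap
-- 	'''
-- 	gap_found = 0
-- 	no_gaps   = 0
--
-- 	for contig in list_of_strings:
--
-- 		for nucl in contig:
-- 			if nucl == "N":
-- 				gap_found +=1
--
-- 			elif gap_found > 0 and nucl != "N":
-- 				no_gaps +=1
-- 				gap_found = 0
--
-- 	return (no_gaps)
-- ===== SOURCE B (Python) =====
-- def number_of_gaps(list_of_strings):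
--     s = "".join(list_of_strings)
--     # Stage 1: mask every non-N character as a space; stage 2: whitespace-split,
--     # so each word is one maximal N-run; a trailing unclosed N-run is not a gap.
--     words = "".join(c if c == "N" else " " for c in s).split()
--     return len(words) - (1 if s.endswith("N") else 0)
-- ===== Notes on version B (the rewrite author's own statement) =====
-- stated objective: idiomatic
-- what changed: Replaces A's stateful nested character loops (gap_found/no_gaps carried across contigs) with staged library passes: join, mask non-N characters to spaces, str.split() so each word is one maximal N-run, then subtract one if the joined string ends in N (that run is never closed).
import Mathlib
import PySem

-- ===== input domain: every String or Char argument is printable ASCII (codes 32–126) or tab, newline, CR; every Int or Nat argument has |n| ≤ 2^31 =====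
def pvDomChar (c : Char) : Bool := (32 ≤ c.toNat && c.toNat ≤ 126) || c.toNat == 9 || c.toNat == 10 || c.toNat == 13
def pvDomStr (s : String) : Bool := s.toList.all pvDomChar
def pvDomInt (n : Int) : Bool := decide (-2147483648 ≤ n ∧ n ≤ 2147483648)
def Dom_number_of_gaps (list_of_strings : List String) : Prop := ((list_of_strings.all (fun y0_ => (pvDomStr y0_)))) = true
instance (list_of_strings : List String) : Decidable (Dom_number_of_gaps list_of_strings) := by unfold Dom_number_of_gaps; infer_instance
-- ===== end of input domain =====

-- B replaces A's stateful nested loops with staged library passes: join, mask non-N chars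
-- to spaces, str.split() (each word = one maximal N-run), minus one if the join ends in N.

-- ===== PORT A =====
-- step for one nucleotide: state = (gap_found, no_gaps)
def pvStepA (st : Int × Int) (nucl : Char) : Int × Int :=
  if nucl = 'N' then (st.1 + 1, st.2)
  else if st.1 > 0 ∧ nucl ≠ 'N' then (0, st.2 + 1)
  else st

def number_of_gaps (list_of_strings : List String) : Int :=
  (list_of_strings.foldl (fun st contig => contig.toList.foldl pvStepA st) (0, 0)).2

-- ===== PORT B =====
def number_of_gaps_alt (list_of_strings : List String) : Int :=
  let s := PySem.Str.join "" list_of_strings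
  let words := PySem.Str.split₀ (String.ofList (s.toList.map (fun c => if c = 'N' then c else ' ')))
  (words.length : Int) - (if PySem.Str.endswith s "N" then 1 else 0)

-- ===== PRECONDITION & SPEC =====
def Spec_number_of_gaps (list_of_strings : List String) (out : Int) : Prop := out = number_of_gaps_alt list_of_strings
instance (list_of_strings : List String) (out : Int) : Decidable (Spec_number_of_gaps list_of_strings out) := by unfold Spec_number_of_gaps; infer_instance

-- ===== CLAIM (what is proved, stated in full; the proofs are below) =====
def Claim_equal_number_of_gaps : Prop := ∀ (list_of_strings : List String), Dom_number_of_gaps list_of_strings → Spec_number_of_gaps list_of_strings (number_of_gaps list_of_strings)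

-- ===== LEMMAS AND PROOFS =====

-- the 'N followed by non-N' boundary count, the common yardstick of both proofs
def pvCz (cs : List Char) : Int :=
  ((cs.zip (cs.drop 1)).countP (fun p => p.1 == 'N' && p.2 != 'N') : Nat)

-- the carried-gap contribution: 1 iff the pending run (g > 0) is closed by the first upcoming char
def pvExtra (g : Int) (cs : List Char) : Int :=
  match cs with
  | [] => 0
  | c :: _ => if 0 < g ∧ c ≠ 'N' then 1 else 0

-- 1 iff the last char is 'N' (the unclosed trailing run)
def pvEndN (cs : List Char) : Int := if cs.getLast? = some 'N' then 1 else 0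
-- 1 iff the first char is 'N'
def pvStartN (cs : List Char) : Int := if cs.head? = some 'N' then 1 else 0

-- word counter mirroring split₀.go's word boundaries: b = currently inside a word
def pvWc (b : Bool) (cs : List Char) : Nat :=
  match cs with
  | [] => 0
  | c :: rest =>
    if PySem.Chars.isspace c then pvWc false rest
    else if b then pvWc true rest else 1 + pvWc true rest

theorem pvCz_cons (a : Char) (rest : List Char) :
    pvCz (a :: rest) = (match rest with
      | [] => 0
      | b :: _ => if a = 'N' ∧ b ≠ 'N' then (1 : Int) else 0) + pvCz rest := by
  cases rest with
  | nil => simp [pvCz]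
  | cons b t =>
    simp only [pvCz, List.drop_succ_cons, List.drop_zero, List.zip_cons_cons, List.countP_cons]
    by_cases hab : a = 'N' ∧ b ≠ 'N'
    · simp [hab.1, hab.2]; ring
    · have : (a == 'N' && b != 'N') = false := by
        by_cases ha : a = 'N'
        · have hb : b = 'N' := by by_contra hb; exact hab ⟨ha, hb⟩
          simp [ha, hb]
        · simp [ha]
      simp [this, hab]

theorem pvFold_spec (cs : List Char) (g n : Int) (hg : 0 ≤ g) :
    (cs.foldl pvStepA (g, n)).2 = n + pvCz cs + pvExtra g cs := by
  induction cs generalizing g n with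
  | nil => simp [pvCz, pvExtra]
  | cons c rest ih =>
    rw [List.foldl_cons, pvCz_cons]
    by_cases hc : c = 'N'
    · have hstep : pvStepA (g, n) c = (g + 1, n) := by simp [pvStepA, hc]
      rw [hstep, ih (g + 1) n (by omega)]
      cases rest with
      | nil => simp [pvExtra, hc]
      | cons b t =>
        by_cases hb : b = 'N'
        · simp [pvExtra, hc, hb]
        · simp [pvExtra, hc, hb]
          omega
    · by_cases hgpos : 0 < g
      · have hstep : pvStepA (g, n) c = (0, n + 1) := by simp [pvStepA, hc, hgpos]
        rw [hstep, ih 0 (n + 1) le_rfl]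
        cases rest with
        | nil => simp [pvExtra, pvCz, hc, hgpos]
        | cons b t => simp [pvExtra, hc, hgpos]; try omega
      · have hstep : pvStepA (g, n) c = (g, n) := by
          simp [pvStepA, hc]; omega
        rw [hstep, ih g n hg]
        cases rest with
        | nil => simp [pvExtra, hc, hgpos]
        | cons b t => simp [pvExtra, hc, hgpos]; try omega

theorem pvNested (l : List String) (st : Int × Int) :
    l.foldl (fun st contig => contig.toList.foldl pvStepA st) st
      = (l.flatMap String.toList).foldl pvStepA st := by
  induction l generalizing st with
  | nil => simp
  | cons c t ih => simp [List.foldl_append, ih]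

theorem pvIntercalateNil (xss : List (List Char)) :
    ([] : List Char).intercalate xss = xss.flatten := by
  induction xss with
  | nil => simp [List.intercalate]
  | cons a t ih =>
    cases t with
    | nil => simp [List.intercalate]
    | cons b t' =>
      simp [List.intercalate, List.intersperse] at ih ⊢
      simpa using ih

theorem pvJoinToList (l : List String) :
    (PySem.Str.join "" l).toList = l.flatMap String.toList := by
  simp [PySem.Str.join, PySem.Chars.join, pvIntercalateNil, List.flatMap]

-- split₀.go builds acc.length words plus the words of the rest (one in progress if cur ≠ [])
theorem pvGo_length (cs : List Char) (cur : List Char) (acc : List (List Char)) :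
    (PySem.Chars.split₀.go cs cur acc).length
      = acc.length + (if cur.isEmpty then pvWc false cs else 1 + pvWc true cs) := by
  induction cs generalizing cur acc with
  | nil => cases cur <;> simp [PySem.Chars.split₀.go, pvWc]
  | cons c rest ih =>
    by_cases hs : PySem.Chars.isspace c
    · cases cur with
      | nil => simp [PySem.Chars.split₀.go, hs, pvWc, ih]
      | cons x xs =>
        simp [PySem.Chars.split₀.go, hs, pvWc, ih]
        omega
    · cases cur with
      | nil => simp [PySem.Chars.split₀.go, hs, pvWc, ih]
      | cons x xs => simp [PySem.Chars.split₀.go, hs, pvWc, ih]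

theorem pvSplit_length (cs : List Char) :
    (PySem.Chars.split₀ cs).length = pvWc false cs := by
  simp [PySem.Chars.split₀, pvGo_length]

-- the mask of the joined string
def pvMask (cs : List Char) : List Char := cs.map (fun c => if c = 'N' then c else ' ')

-- word count of the mask = boundary count + trailing-run correction
theorem pvWc_mask (cs : List Char) :
    ((pvWc false (pvMask cs) : Int) = pvCz cs + pvEndN cs) ∧
    ((pvWc true (pvMask cs) : Int) = pvCz cs + pvEndN cs - pvStartN cs) := by
  induction cs with
  | nil => simp [pvMask, pvWc, pvCz, pvEndN, pvStartN]
  | cons c rest ih =>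
    obtain ⟨ihf, iht⟩ := ih
    by_cases hc : c = 'N'
    · have hns : PySem.Chars.isspace 'N' = false := by decide
      have hmask : pvMask (c :: rest) = 'N' :: pvMask rest := by simp [pvMask, hc]
      rw [pvCz_cons]
      constructor
      · rw [hmask]
        simp only [pvWc, hns, Bool.false_eq_true, if_false, if_true]
        push_cast [iht]
        cases rest with
        | nil => simp [pvCz, pvEndN, pvStartN, hc]
        | cons b t =>
          by_cases hb : b = 'N' <;>
            simp [pvEndN, pvStartN, hc, hb, List.getLast?_cons_cons] <;> ring
      · rw [hmask]
        simp only [pvWc, hns, Bool.false_eq_true, if_false, if_true]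
        rw [iht]
        cases rest with
        | nil => simp [pvCz, pvEndN, pvStartN, hc]
        | cons b t =>
          by_cases hb : b = 'N' <;>
            simp [pvEndN, pvStartN, hc, hb, List.getLast?_cons_cons] <;> ring
    · have hmask : pvMask (c :: rest) = ' ' :: pvMask rest := by simp [pvMask, hc]
      have hsp : PySem.Chars.isspace ' ' = true := by decide
      rw [pvCz_cons]
      have hcommon : ∀ b : Bool, (pvWc b (pvMask (c :: rest)) : Int) = pvCz rest + pvEndN rest := by
        intro b
        rw [hmask]
        simp only [pvWc, hsp, if_true]
        exact ihf
      have hend : pvEndN (c :: rest) = pvEndN rest ∨ (rest = [] ∧ pvEndN (c :: rest) = 0) := by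
        cases rest with
        | nil => right; exact ⟨rfl, by simp [pvEndN, hc]⟩
        | cons b t => left; simp [pvEndN, List.getLast?_cons_cons]
      constructor
      · rw [hcommon false]
        rcases hend with h | ⟨hr, h⟩
        · rw [h]; cases rest <;> simp [hc]
        · subst hr; simp [pvCz, pvEndN, hc]
      · rw [hcommon true]
        have hst : pvStartN (c :: rest) = 0 := by simp [pvStartN, hc]
        rw [hst]
        rcases hend with h | ⟨hr, h⟩
        · rw [h]; cases rest <;> simp [hc]
        · subst hr; simp [pvCz, pvEndN, hc]

theorem pvEndswith_eq (s : List Char) :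
    (if PySem.Chars.endswith s ['N'] then (1 : Int) else 0) = pvEndN s := by
  induction s using List.reverseRecOn with
  | nil => decide
  | append_singleton t c ih =>
    simp [PySem.Chars.endswith, List.isSuffixOf, List.isPrefixOf, pvEndN, List.getLast?_append]
    by_cases hc : c = 'N'
    · simp [hc]
    · simp [hc]; exact fun h => hc h.symm

-- ===== VERDICT (by name: the statement is the Claim_ definition above) =====
theorem number_of_gaps_spec : Claim_equal_number_of_gaps := by
  intro l _
  unfold Spec_number_of_gaps number_of_gaps number_of_gaps_alt
  rw [pvNested, pvFold_spec _ 0 0 le_rfl]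
  have hlen : (PySem.Str.split₀ (String.ofList ((PySem.Str.join "" l).toList.map (fun c => if c = 'N' then c else ' ')))).length
      = pvWc false (pvMask ((PySem.Str.join "" l).toList)) := by
    have := PySem.Str.split₀_map_toList (String.ofList ((PySem.Str.join "" l).toList.map (fun c => if c = 'N' then c else ' ')))
    have hlen2 : (PySem.Str.split₀ (String.ofList ((PySem.Str.join "" l).toList.map (fun c => if c = 'N' then c else ' ')))).length
        = (PySem.Chars.split₀ ((pvMask ((PySem.Str.join "" l).toList)))).length := by
      have hl := congrArg List.length this
      rw [List.length_map] at hl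
      rw [hl, String.toList_ofList]; rfl
    rw [hlen2, pvSplit_length]
  have hend : PySem.Str.endswith (PySem.Str.join "" l) "N"
      = PySem.Chars.endswith (PySem.Str.join "" l).toList ['N'] := by
    simp [PySem.Str.endswith]
  simp only [hlen, hend]
  have h1 := (pvWc_mask ((PySem.Str.join "" l).toList)).1
  have h2 := pvEndswith_eq ((PySem.Str.join "" l).toList)
  have hex : pvExtra 0 ((l.flatMap String.toList)) = 0 := by
    cases l.flatMap String.toList <;> simp [pvExtra]
  rw [hex]
  rw [h1, ← h2]
  rw [pvJoinToList]
  ring
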